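-- pv_equiv track=rewrite | github.com/theSLWayne/DuplicateFilesRemover | dr.py | getsameHash
-- ===== SOURCE A (Python) =====
-- def getsameHash(fileHashes):
--     """
--
--     Return a list of indexes in the given list that have similar hashes
--
--     :param fileSizes: List containing all file hashes of a directory
--     :return: List of indexes of the fileSizes list that have similar filesize hashes
--     """
--
--     sameHash = list()
--     for i in range(len(fileHashes)-1):
--         for j in range(i+1, len(fileHashes)):
--             if(fileHashes[i] == fileHashes[j]):
--                 n = 0
--                 for m in range(len(sameHash)):
--                     if(j == sameHash[m]):
--                         n = n + 1
--                 if(n == 0):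
--                     sameHash.append(j)
--                 k = 0
--                 for l in range(len(sameHash)):
--                     if(i == sameHash[l]):
--                         k = k + 1
--                 if(k == 0):
--                     sameHash.append(i)
--
--     return sameHash
-- ===== SOURCE B (Python) =====
-- def getsameHash(fileHashes):
--     """Return indexes of fileHashes that share a hash with another index.
--
--     Simpler/faster: one pass over first occurrences; each duplicate group
--     g0<g1<g2<... is emitted as [g1, g0, g2, ...] (the order A produces).
--     """
--     seen = set()
--     result = []
--     n = len(fileHashes)
--     for i, h in enumerate(fileHashes):
--         if h in seen:
--             continue
--         seen.add(h)
--         group = [j for j in range(i, n) if fileHashes[j] == h]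
--         if len(group) > 1:
--             result.append(group[1])
--             result.append(group[0])
--             result.extend(group[2:])
--     return result
-- ===== Notes on version B (the rewrite author's own statement) =====
-- stated objective: faster
-- what changed: A's O(n^2) pairwise hash comparisons, each rescanning the growing result list for duplicates (O(n^3) worst case), are replaced by a single pass over first occurrences of each hash that collects the hash's whole index group in one scan and emits it as [g1, g0, g2, ...].
import Mathlib
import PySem

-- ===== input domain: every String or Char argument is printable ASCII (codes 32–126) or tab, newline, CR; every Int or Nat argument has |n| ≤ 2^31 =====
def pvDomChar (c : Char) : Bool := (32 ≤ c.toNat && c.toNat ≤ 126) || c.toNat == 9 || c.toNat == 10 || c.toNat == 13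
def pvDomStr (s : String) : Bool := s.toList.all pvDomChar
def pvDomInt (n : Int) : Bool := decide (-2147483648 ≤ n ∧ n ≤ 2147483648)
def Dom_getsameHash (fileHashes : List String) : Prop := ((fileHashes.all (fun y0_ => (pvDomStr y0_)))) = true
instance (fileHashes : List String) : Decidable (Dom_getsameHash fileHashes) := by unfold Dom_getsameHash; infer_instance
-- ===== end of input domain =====

-- B replaces A's pairwise scan with result-membership loops by a single pass over
-- first occurrences that collects each hash's index group directly (objective: faster).

-- ===== PORT A =====
def getsameHash (fileHashes : List String) : List Int :=
  (PySem.List.pyRange 0 ((fileHashes.length : Int) - 1) 1).foldl (fun sameHash i =>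
    (PySem.List.pyRange (i + 1) (fileHashes.length : Int) 1).foldl (fun sameHash j =>
      if PySem.List.pyGetD fileHashes i "" = PySem.List.pyGetD fileHashes j "" then
        let sameHash1 :=
          if ((PySem.List.pyRange 0 (sameHash.length : Int) 1).foldl
              (fun n m => if j = PySem.List.pyGetD sameHash m 0 then n + 1 else n) (0 : Int)) = 0
          then sameHash ++ [j] else sameHash
        if ((PySem.List.pyRange 0 (sameHash1.length : Int) 1).foldl
            (fun k l => if i = PySem.List.pyGetD sameHash1 l 0 then k + 1 else k) (0 : Int)) = 0
        then sameHash1 ++ [i] else sameHash1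
      else sameHash)
      sameHash)
    []

-- ===== PORT B =====
def getsameHash_alt (fileHashes : List String) : List Int :=
  ((PySem.List.enumerate fileHashes 0).foldl
    (fun (st : PySem.Set String × List Int) p =>
      if PySem.Set.contains st.1 p.2 then st
      else
        let group := (PySem.List.pyRange p.1 (fileHashes.length : Int) 1).foldl
          (fun g j => if PySem.List.pyGetD fileHashes j "" = p.2 then g ++ [j] else g) []
        if 1 < group.length then
          (PySem.Set.add st.1 p.2,
           st.2 ++ [PySem.List.pyGetD group 1 0] ++ [PySem.List.pyGetD group 0 0]
                ++ PySem.List.slice group (some 2) none)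
        else (PySem.Set.add st.1 p.2, st.2))
    (PySem.Set.empty, [])).2

-- ===== PRECONDITION & SPEC =====
def Spec_getsameHash (fileHashes : List String) (out : List Int) : Prop := out = getsameHash_alt fileHashes
instance (fileHashes : List String) (out : List Int) : Decidable (Spec_getsameHash fileHashes out) := by unfold Spec_getsameHash; infer_instance

-- ===== CLAIM (what is proved, stated in full; the proofs are below) =====
def Claim_equal_getsameHash : Prop := ∀ (fileHashes : List String), Dom_getsameHash fileHashes → Spec_getsameHash fileHashes (getsameHash fileHashes)

-- ===== LEMMAS AND PROOFS =====

def pvCnt (x : Int) (s : List Int) : Int :=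
  (PySem.List.pyRange 0 (s.length : Int) 1).foldl
    (fun c m => if x = PySem.List.pyGetD s m 0 then c + 1 else c) (0 : Int)

theorem pv_cnt_eq_count (x : Int) (s : List Int) : pvCnt x s = (s.count x : Int) := by
  unfold pvCnt
  rw [PySem.List.foldl_pyRange_zero_pyGetD' s 0 (fun c v => if x = v then c + 1 else c) 0]
  rw [PySem.List.foldl_ite_add_one (p := fun v => x = v)]
  rw [List.count_eq_countP]
  rw [List.countP_congr (p := fun v => decide (x = v)) (q := fun v => v == x) (fun a _ => by
    by_cases h : x = a
    · simp [h]
    · simp [h, Ne.symm h])]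
  simp

def pvApp (i : Int) (s : List Int) (j : Int) : List Int :=
  let s1 := if pvCnt j s = 0 then s ++ [j] else s
  if pvCnt i s1 = 0 then s1 ++ [i] else s1

theorem pvApp_of_mem {i j : Int} {s : List Int} (hj : j ∈ s) (hi : i ∈ s) : pvApp i s j = s := by
  unfold pvApp
  simp only [pv_cnt_eq_count, Nat.cast_eq_zero, List.count_eq_zero]
  rw [if_neg (show ¬ i ∉ (if j ∉ s then s ++ [j] else s) from by split <;> simp [hi]),
      if_neg (by simp [hj])]

theorem pvApp_of_fresh {i j : Int} {s : List Int} (hj : j ∉ s) (hi : i ∈ s) : pvApp i s j = s ++ [j] := by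
  unfold pvApp
  simp only [pv_cnt_eq_count, Nat.cast_eq_zero, List.count_eq_zero]
  rw [if_pos hj, if_neg (by simp [hi])]

theorem pvApp_first {i j : Int} {s : List Int} (hj : j ∉ s) (hi : i ∉ s) (hij : i ≠ j) :
    pvApp i s j = s ++ [j, i] := by
  unfold pvApp
  simp only [pv_cnt_eq_count, Nat.cast_eq_zero, List.count_eq_zero]
  rw [if_pos hj, if_pos (by simp [hi, hij])]
  simp

theorem pv_skipFold (i : Int) : ∀ (ms s : List Int), i ∈ s → (∀ j ∈ ms, j ∈ s) →
    ms.foldl (pvApp i) s = s := by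
  intro ms
  induction ms with
  | nil => intro s _ _; rfl
  | cons j rest ih =>
    intro s hi hall
    simp only [List.foldl_cons]
    rw [pvApp_of_mem (hall j (by simp)) hi]
    exact ih s hi (fun j' hj' => hall j' (by simp [hj']))

theorem pv_tailFold (i : Int) : ∀ (ms s : List Int), i ∈ s → ms.Nodup → (∀ j ∈ ms, j ∉ s) →
    ms.foldl (pvApp i) s = s ++ ms := by
  intro ms
  induction ms with
  | nil => intro s _ _ _; simp
  | cons j rest ih =>
    intro s hi hnd hall
    simp only [List.foldl_cons]
    rw [pvApp_of_fresh (hall j (by simp)) hi]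
    rw [ih (s ++ [j]) (by simp [hi]) hnd.of_cons]
    · simp
    · intro j' hj'
      simp only [List.mem_append, List.mem_singleton]
      rintro (h | h)
      · exact hall j' (by simp [hj']) h
      · exact (List.nodup_cons.mp hnd).1 (h ▸ hj')

def pvHi (hs : List String) (j : Int) : String := PySem.List.pyGetD hs j ""
def pvGrp (hs : List String) (i : Int) : List Int :=
  (PySem.List.pyRange 0 (hs.length : Int) 1).filter (fun j => decide (pvHi hs j = pvHi hs i))
def pvFirst (hs : List String) (i : Int) : Bool :=
  (PySem.List.pyRange 0 i 1).all (fun j => !decide (pvHi hs j = pvHi hs i))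
def pvEmit : List Int → List Int
  | a :: b :: rest => b :: a :: rest
  | _ => []
def pvContrib (hs : List String) (i : Int) : List Int :=
  if pvFirst hs i then pvEmit (pvGrp hs i) else []
def pvCanon (hs : List String) (k : Int) : List Int :=
  (PySem.List.pyRange 0 k 1).flatMap (pvContrib hs)

theorem pv_mem_grp {hs x i} : x ∈ pvGrp hs i ↔ 0 ≤ x ∧ x < (hs.length : Int) ∧ pvHi hs x = pvHi hs i := by
  simp [pvGrp, List.mem_filter, PySem.List.mem_pyRange_one, and_assoc]

theorem pv_grp_congr {hs f i} (h : pvHi hs f = pvHi hs i) : pvGrp hs f = pvGrp hs i := by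
  unfold pvGrp; apply List.filter_congr; intro j _; simp [h]

theorem pv_first_iff {hs i} : pvFirst hs i = true ↔ ∀ j, 0 ≤ j → j < i → pvHi hs j ≠ pvHi hs i := by
  simp [pvFirst, List.all_eq_true, PySem.List.mem_pyRange_one]

theorem pv_emit_short {g : List Int} (h : g.length ≤ 1) : pvEmit g = [] := by
  match g with
  | [] => rfl
  | [a] => rfl
  | a :: b :: t => simp at h

theorem pv_mem_emit {g : List Int} {x : Int} (h : 1 < g.length) : x ∈ pvEmit g ↔ x ∈ g := by
  match g with
  | [] => simp at h
  | [a] => simp at h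
  | a :: b :: t => simp [pvEmit]; tauto

theorem pv_canon_succ {hs k} (h : (0:Int) ≤ k) : pvCanon hs (k + 1) = pvCanon hs k ++ pvContrib hs k := by
  unfold pvCanon
  rw [PySem.List.pyRange_one_succ_right h]
  simp

theorem pv_one_lt_length {l : List Int} {a b : Int} (ha : a ∈ l) (hb : b ∈ l) (h : a ≠ b) :
    1 < l.length := by
  match l with
  | [] => simp at ha
  | [x] => simp at ha hb; subst ha; subst hb; exact absurd rfl h
  | x :: y :: t => simp

theorem pv_mem_canon {hs x k} : x ∈ pvCanon hs k ↔
    ∃ f, 0 ≤ f ∧ f < k ∧ pvFirst hs f = true ∧ 1 < (pvGrp hs f).length ∧ x ∈ pvGrp hs f := by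
  unfold pvCanon pvContrib
  simp only [List.mem_flatMap, PySem.List.mem_pyRange_one]
  constructor
  · rintro ⟨f, ⟨hf0, hfk⟩, hx⟩
    split at hx
    · by_cases hlen : 1 < (pvGrp hs f).length
      · exact ⟨f, hf0, hfk, by assumption, hlen, (pv_mem_emit hlen).mp hx⟩
      · rw [pv_emit_short (by omega)] at hx; simp at hx
    · simp at hx
  · rintro ⟨f, h0, hk, hfirst, hlen, hx⟩
    exact ⟨f, ⟨h0, hk⟩, by rw [if_pos hfirst]; exact (pv_mem_emit hlen).mpr hx⟩

theorem pv_exFirst (hs : List String) : ∀ (m : Nat) (i : Int), 0 ≤ i → i.toNat ≤ m →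
    ∃ f, 0 ≤ f ∧ f ≤ i ∧ pvFirst hs f = true ∧ pvHi hs f = pvHi hs i := by
  intro m
  induction m with
  | zero =>
    intro i h0 hm
    have : i = 0 := by omega
    subst this
    exact ⟨0, le_refl _, le_refl _, by simp [pvFirst, PySem.List.pyRange_one_eq_nil (le_refl (0:Int))], rfl⟩
  | succ m ih =>
    intro i h0 hm
    by_cases hf : pvFirst hs i = true
    · exact ⟨i, h0, le_refl _, hf, rfl⟩
    · have : ∃ j, 0 ≤ j ∧ j < i ∧ pvHi hs j = pvHi hs i := by
        simpa [pvFirst, List.all_eq_true, PySem.List.mem_pyRange_one] using hf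
      obtain ⟨j, hj0, hji, hjh⟩ := this
      obtain ⟨f, hf0, hfj, hff, hfh⟩ := ih j hj0 (by omega)
      exact ⟨f, hf0, by omega, hff, hfh.trans hjh⟩

theorem pv_fresh {hs i x} (hf : pvFirst hs i = true) (hx : x ∈ pvGrp hs i) :
    x ∉ pvCanon hs i := by
  rw [pv_mem_canon]
  rintro ⟨f, h0, hfi, hffirst, _, hxf⟩
  have h1 := (pv_mem_grp.mp hx).2.2
  have h2 := (pv_mem_grp.mp hxf).2.2
  exact (pv_first_iff.mp hf) f h0 hfi (h2.symm.trans h1)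

theorem pv_present {hs i} (h0 : (0:Int) ≤ i) (hn : i < (hs.length : Int))
    (hf : pvFirst hs i = false) : ∀ x ∈ pvGrp hs i, x ∈ pvCanon hs i := by
  intro x hx
  obtain ⟨f, hf0, hfi, hff, hfh⟩ := pv_exFirst hs i.toNat i h0 (le_refl _)
  have hfne : f ≠ i := by rintro rfl; rw [hff] at hf; simp at hf
  have hflt : f < i := lt_of_le_of_ne hfi hfne
  have hgeq : pvGrp hs f = pvGrp hs i := pv_grp_congr hfh
  have hif : i ∈ pvGrp hs f := by rw [hgeq]; exact pv_mem_grp.mpr ⟨h0, hn, rfl⟩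
  have hff' : f ∈ pvGrp hs f := pv_mem_grp.mpr ⟨hf0, by omega, rfl⟩
  rw [pv_mem_canon]
  exact ⟨f, hf0, hflt, hff, pv_one_lt_length hff' hif hfne, by rw [hgeq]; exact hx⟩

theorem pv_grp_first_eq' {hs i} (h0 : (0:Int) ≤ i) (hn : i ≤ (hs.length : Int)) (hf : pvFirst hs i = true) :
    pvGrp hs i = (PySem.List.pyRange i (hs.length : Int) 1).filter
      (fun j => decide (pvHi hs j = pvHi hs i)) := by
  unfold pvGrp
  rw [PySem.List.pyRange_one_append 0 i (hs.length : Int) h0 hn, List.filter_append]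
  have h1 : (PySem.List.pyRange 0 i 1).filter (fun j => decide (pvHi hs j = pvHi hs i)) = [] := by
    rw [List.filter_eq_nil_iff]
    intro j hj
    simp only [PySem.List.mem_pyRange_one] at hj
    simp [(pv_first_iff.mp hf) j hj.1 hj.2]
  rw [h1, List.nil_append]

theorem pv_grp_first_eq {hs i} (h0 : (0:Int) ≤ i) (hn : i < (hs.length : Int))
    (hf : pvFirst hs i = true) :
    pvGrp hs i = i :: (PySem.List.pyRange (i + 1) (hs.length : Int) 1).filter
      (fun j => decide (pvHi hs j = pvHi hs i)) := by
  rw [pv_grp_first_eq' h0 (le_of_lt hn) hf, PySem.List.pyRange_one_cons hn]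
  simp

def pvOuterA (hs : List String) (s : List Int) (i : Int) : List Int :=
  (PySem.List.pyRange (i + 1) (hs.length : Int) 1).foldl
    (fun s j => if pvHi hs i = pvHi hs j then pvApp i s j else s) s

theorem pv_portA_eq (hs : List String) :
    getsameHash hs = (PySem.List.pyRange 0 ((hs.length : Int) - 1) 1).foldl (pvOuterA hs) [] := rfl

theorem pv_outerA_step (hs : List String) (i : Int) (h0 : (0:Int) ≤ i) (hn : i < (hs.length : Int)) :
    pvOuterA hs (pvCanon hs i) i = pvCanon hs (i + 1) := by
  rw [pv_canon_succ h0]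
  unfold pvOuterA
  rw [PySem.List.foldl_ite_eq_foldl_filter (p := fun j => pvHi hs i = pvHi hs j) (f := pvApp i)]
  have hms : (PySem.List.pyRange (i+1) (hs.length : Int) 1).filter (fun j => decide (pvHi hs i = pvHi hs j))
      = (PySem.List.pyRange (i+1) (hs.length : Int) 1).filter (fun j => decide (pvHi hs j = pvHi hs i)) :=
    List.filter_congr (fun j _ => decide_eq_decide.mpr eq_comm)
  rw [hms]
  set ms := (PySem.List.pyRange (i+1) (hs.length : Int) 1).filter (fun j => decide (pvHi hs j = pvHi hs i)) with hms_def
  have hms_mem : ∀ j ∈ ms, j ∈ pvGrp hs i ∧ i < j := by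
    intro j hj
    rw [hms_def, List.mem_filter] at hj
    obtain ⟨hjr, hjh⟩ := hj
    rw [PySem.List.mem_pyRange_one] at hjr
    exact ⟨pv_mem_grp.mpr ⟨by omega, hjr.2, of_decide_eq_true hjh⟩, by omega⟩
  have hms_nodup : ms.Nodup := (PySem.List.nodup_pyRange_one _ _).filter _
  by_cases hf : pvFirst hs i = true
  · have hgrp : pvGrp hs i = i :: ms := pv_grp_first_eq h0 hn hf
    have hinotin : i ∉ pvCanon hs i := pv_fresh hf (pv_mem_grp.mpr ⟨h0, hn, rfl⟩)
    match hmseq : ms with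
    | [] =>
      simp only [List.foldl_nil]
      have : pvContrib hs i = [] := by
        unfold pvContrib
        rw [if_pos hf, hgrp, pv_emit_short (by simp)]
      rw [this, List.append_nil]
    | j1 :: rest =>
      rw [List.foldl_cons]
      have hj1 := hms_mem j1 (by simp)
      have hj1notin : j1 ∉ pvCanon hs i := pv_fresh hf hj1.1
      rw [pvApp_first hj1notin hinotin (by omega)]
      rw [pv_tailFold i rest (pvCanon hs i ++ [j1, i]) (by simp)
        hms_nodup.of_cons
        (by
          intro j hj
          have hjm := hms_mem j (by simp [hj])
          have hij := hjm.2
          have hjnotin : j ∉ pvCanon hs i := pv_fresh hf hjm.1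
          have hjne1 : j ≠ j1 :=
            fun h => (List.nodup_cons.mp hms_nodup).1 (h ▸ hj)
          intro hcon
          simp only [List.mem_append, List.mem_cons] at hcon
          rcases hcon with h | h | h | h
          · exact hjnotin h
          · exact hjne1 h
          · omega
          · simp at h)]
      have : pvContrib hs i = j1 :: i :: rest := by
        unfold pvContrib
        rw [if_pos hf, hgrp]
        rfl
      rw [this]
      simp
  · have hf' : pvFirst hs i = false := by simpa using hf
    rw [pv_skipFold i ms (pvCanon hs i)
      (pv_present h0 hn hf' i (pv_mem_grp.mpr ⟨h0, hn, rfl⟩))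
      (fun j hj => pv_present h0 hn hf' j (hms_mem j hj).1)]
    have : pvContrib hs i = [] := by unfold pvContrib; rw [hf']; rfl
    rw [this, List.append_nil]

theorem pv_A_loop (hs : List String) : ∀ (k : Nat), (k : Int) ≤ (hs.length : Int) →
    (PySem.List.pyRange 0 (k : Int) 1).foldl (pvOuterA hs) [] = pvCanon hs (k : Int) := by
  intro k
  induction k with
  | zero =>
    intro _
    rw [PySem.List.pyRange_one_eq_nil (by norm_num)]
    unfold pvCanon
    rw [PySem.List.pyRange_one_eq_nil (by norm_num)]
    rfl
  | succ k ih =>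
    intro hk
    have h1 : ((k:Int) + 1) ≤ (hs.length : Int) := by push_cast at hk ⊢; omega
    have h2 : (((k+1:Nat)):Int) = (k:Int) + 1 := by push_cast; ring
    rw [h2, PySem.List.pyRange_one_succ_right (by positivity), List.foldl_append]
    rw [ih (by omega), List.foldl_cons, List.foldl_nil]
    exact pv_outerA_step hs (k:Int) (by positivity) (by omega)

theorem pv_A_eq_canon (hs : List String) : getsameHash hs = pvCanon hs (hs.length : Int) := by
  rw [pv_portA_eq]
  rcases Nat.eq_zero_or_pos hs.length with h0 | hpos
  · rw [h0]
    simp only [Nat.cast_zero, zero_sub]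
    rw [PySem.List.pyRange_one_eq_nil (by norm_num)]
    unfold pvCanon
    rw [PySem.List.pyRange_one_eq_nil (by norm_num)]
    rfl
  · have h1 : ((hs.length : Int) - 1) = ((hs.length - 1 : Nat) : Int) := by
      omega
    rw [h1, pv_A_loop hs (hs.length - 1) (by omega)]
    have h2 : (hs.length : Int) = ((hs.length - 1 : Nat) : Int) + 1 := by omega
    rw [h2, pv_canon_succ (by positivity)]
    have h3 : pvContrib hs ((hs.length - 1 : Nat) : Int) = [] := by
      unfold pvContrib
      by_cases hf : pvFirst hs ((hs.length - 1 : Nat) : Int) = true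
      · rw [if_pos hf]
        rw [pv_grp_first_eq (by positivity) (by omega) hf]
        rw [show ((hs.length - 1 : Nat) : Int) + 1 = (hs.length : Int) by omega]
        rw [PySem.List.pyRange_one_eq_nil (le_refl _)]
        rfl
      · rw [if_neg hf]
    rw [h3, List.append_nil]

def pvStepB (hs : List String) (st : PySem.Set String × List Int) (j : Int) :
    PySem.Set String × List Int :=
  if PySem.Set.contains st.1 (pvHi hs j) then st
  else
    let group := (PySem.List.pyRange j (hs.length : Int) 1).foldl
      (fun g j' => if PySem.List.pyGetD hs j' "" = pvHi hs j then g ++ [j'] else g) []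
    if 1 < group.length then
      (PySem.Set.add st.1 (pvHi hs j),
       st.2 ++ [PySem.List.pyGetD group 1 0] ++ [PySem.List.pyGetD group 0 0]
            ++ PySem.List.slice group (some 2) none)
    else (PySem.Set.add st.1 (pvHi hs j), st.2)

theorem pv_portB_eq (hs : List String) :
    getsameHash_alt hs =
      ((PySem.List.pyRange 0 (hs.length : Int) 1).foldl (pvStepB hs) (PySem.Set.empty, [])).2 := by
  unfold getsameHash_alt
  rw [PySem.List.enumerate_eq_map_pyRange (d := "")]
  rw [List.foldl_map]
  rfl

def pvSeen (hs : List String) (k : Int) : PySem.Set String :=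
  PySem.Set.ofList ((PySem.List.pyRange 0 k 1).map (pvHi hs))

theorem pv_seen_mem {hs k h} : h ∈ pvSeen hs k ↔ ∃ j, 0 ≤ j ∧ j < k ∧ pvHi hs j = h := by
  unfold pvSeen
  rw [PySem.Set.mem_ofList]
  simp [List.mem_map, PySem.List.mem_pyRange_one]
  constructor
  · rintro ⟨j, ⟨h0, hk⟩, hh⟩; exact ⟨j, h0, hk, hh⟩
  · rintro ⟨j, h0, hk, hh⟩; exact ⟨j, ⟨h0, hk⟩, hh⟩

theorem pv_seen_succ {hs} {k : Int} (h0 : (0:Int) ≤ k) :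
    pvSeen hs (k + 1) = PySem.Set.add (pvSeen hs k) (pvHi hs k) := by
  unfold pvSeen
  rw [PySem.List.pyRange_one_succ_right h0, List.map_append]
  exact PySem.Set.ofList_append_singleton _ _

theorem pv_stepB_canon (hs : List String) (k : Int) (h0 : (0:Int) ≤ k) (hn : k < (hs.length : Int)) :
    pvStepB hs (pvSeen hs k, pvCanon hs k) k = (pvSeen hs (k + 1), pvCanon hs (k + 1)) := by
  unfold pvStepB
  rw [pv_canon_succ h0, pv_seen_succ h0]
  by_cases hf : pvFirst hs k = true
  · have hcon : PySem.Set.contains (pvSeen hs k) (pvHi hs k) = false := by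
      rw [Bool.eq_false_iff]
      intro hc
      have hmem : pvHi hs k ∈ pvSeen hs k := by
        simpa [PySem.Set.contains_eq_listContains] using hc
      obtain ⟨j, hj0, hjk, hjh⟩ := pv_seen_mem.mp hmem
      exact (pv_first_iff.mp hf) j hj0 hjk hjh
    rw [hcon]
    simp only [Bool.false_eq_true, if_false]
    have hgroup : (PySem.List.pyRange k (hs.length : Int) 1).foldl
        (fun g j' => if PySem.List.pyGetD hs j' "" = pvHi hs k then g ++ [j'] else g) []
        = pvGrp hs k := by
      rw [PySem.List.foldl_append_ite_eq_filter (p := fun j' => PySem.List.pyGetD hs j' "" = pvHi hs k)]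
      rw [List.nil_append]
      rw [pv_grp_first_eq' h0 (le_of_lt hn) hf]
      exact List.filter_congr (fun j _ => rfl)
    rw [hgroup]
    have hcontrib : pvContrib hs k = pvEmit (pvGrp hs k) := by unfold pvContrib; rw [if_pos hf]
    by_cases hlen : 1 < (pvGrp hs k).length
    · rw [if_pos hlen]
      match hg : pvGrp hs k with
      | g0 :: g1 :: rest =>
        have e1 : PySem.List.pyGetD (g0 :: g1 :: rest) 1 0 = g1 := by
          rw [show ((1:Int)) = ((1:Nat):Int) by norm_num, PySem.List.pyGetD_natCast]
          rfl
        have e0 : PySem.List.pyGetD (g0 :: g1 :: rest) 0 0 = g0 := by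
          rw [show ((0:Int)) = ((0:Nat):Int) by norm_num, PySem.List.pyGetD_natCast]
          rfl
        have e2 : PySem.List.slice (g0 :: g1 :: rest) (some 2) none = rest := by
          rw [show ((2:Int)) = ((2:Nat):Int) by norm_num, PySem.List.slice_from_natCast]
          rfl
        rw [e1, e0, e2, hcontrib, hg]
        simp [pvEmit]
      | [] => rw [hg] at hlen; simp at hlen
      | [g0] => rw [hg] at hlen; simp at hlen
    · rw [if_neg hlen]
      rw [hcontrib, pv_emit_short (by omega), List.append_nil]
  · have hf' : pvFirst hs k = false := by simpa using hf
    have hex : ∃ j, (0 ≤ j ∧ j < k) ∧ pvHi hs j = pvHi hs k := by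
      simpa [pvFirst, List.all_eq_true, PySem.List.mem_pyRange_one] using hf'
    obtain ⟨j, ⟨hj0, hjk⟩, hjh⟩ := hex
    have hmem : pvHi hs k ∈ pvSeen hs k := pv_seen_mem.mpr ⟨j, hj0, hjk, hjh⟩
    have hcon : PySem.Set.contains (pvSeen hs k) (pvHi hs k) = true := by
      simpa [PySem.Set.contains_eq_listContains] using hmem
    rw [hcon]
    simp only [if_true]
    have hc : pvContrib hs k = [] := by unfold pvContrib; rw [hf']; rfl
    rw [hc, List.append_nil, PySem.Set.add_of_mem hmem]

theorem pv_B_loop (hs : List String) : ∀ (k : Nat), (k : Int) ≤ (hs.length : Int) →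
    (PySem.List.pyRange 0 (k : Int) 1).foldl (pvStepB hs) (PySem.Set.empty, [])
      = (pvSeen hs (k : Int), pvCanon hs (k : Int)) := by
  intro k
  induction k with
  | zero =>
    intro _
    rw [PySem.List.pyRange_one_eq_nil (by norm_num)]
    unfold pvSeen pvCanon
    rw [PySem.List.pyRange_one_eq_nil (by norm_num)]
    rfl
  | succ k ih =>
    intro hk
    have h2 : (((k+1:Nat)):Int) = (k:Int) + 1 := by push_cast; ring
    rw [h2, PySem.List.pyRange_one_succ_right (by positivity), List.foldl_append]
    rw [ih (by push_cast at hk ⊢; omega), List.foldl_cons, List.foldl_nil]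
    exact pv_stepB_canon hs (k:Int) (by positivity) (by push_cast at hk ⊢; omega)

theorem pv_B_eq_canon (hs : List String) : getsameHash_alt hs = pvCanon hs (hs.length : Int) := by
  rw [pv_portB_eq, pv_B_loop hs hs.length (le_refl _)]

-- ===== VERDICT (by name: the statement is the Claim_ definition above) =====
theorem getsameHash_spec : Claim_equal_getsameHash := by
  intro fileHashes _
  unfold Spec_getsameHash
  rw [pv_A_eq_canon, pv_B_eq_canon]
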